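-- pv_equiv track=rewrite | github.com/zhensmarks/BMachine.v2 | publish/Scripts/Master/profesi_flat.py | detect_category_from_parts
-- ===== SOURCE A (Python) =====
-- def detect_category_from_parts(parts_dir):
--     idx_sporty = [i for i, c in enumerate(parts_dir) if 'sporty' in c.lower()]
--     idx_profesi = [i for i, c in enumerate(parts_dir) if 'profesi' in c.lower()]
--     last_sporty = idx_sporty[-1] if idx_sporty else None
--     last_profesi = idx_profesi[-1] if idx_profesi else None
--     if last_sporty is not None and last_profesi is not None:
--         return 'sporty' if last_sporty > last_profesi else 'profesi'
--     if last_sporty is not None: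
--         return 'sporty'
--     if last_profesi is not None:
--         return 'profesi'
--     return None
-- ===== SOURCE B (Python) =====
-- def detect_category_from_parts(parts_dir):
--     for c in reversed(parts_dir):
--         cl = c.lower()
--         has_s = 'sporty' in cl
--         has_p = 'profesi' in cl
--         if has_s and has_p:
--             return 'profesi'
--         elif has_s:
--             return 'sporty'
--         elif has_p:
--             return 'profesi'
--     return None
-- ===== Notes on version B (the rewrite author's own statement) =====
-- stated objective: simpler
-- what changed: Replaces the two full enumerate/filter passes and last-index comparison with a single short-circuiting reverse scan that returns at the highest matching part ('profesi' when a part contains both substrings, matching A's tie at equal last indices).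
import Mathlib
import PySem

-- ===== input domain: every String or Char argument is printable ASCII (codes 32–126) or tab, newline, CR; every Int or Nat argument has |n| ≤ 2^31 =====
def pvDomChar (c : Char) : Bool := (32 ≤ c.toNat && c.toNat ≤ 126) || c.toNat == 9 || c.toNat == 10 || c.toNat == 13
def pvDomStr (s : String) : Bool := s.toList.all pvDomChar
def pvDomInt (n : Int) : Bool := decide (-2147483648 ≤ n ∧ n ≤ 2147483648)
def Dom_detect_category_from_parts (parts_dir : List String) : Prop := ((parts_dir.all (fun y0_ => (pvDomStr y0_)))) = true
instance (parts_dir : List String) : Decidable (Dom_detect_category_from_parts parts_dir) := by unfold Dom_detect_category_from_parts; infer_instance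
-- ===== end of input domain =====

-- B replaces A's two enumerate/filter passes and last-index comparison by one short-circuiting
-- reverse scan (objective: simpler); return value only, no mutation.

-- ===== PORT A =====
-- [i for i, c in enumerate(parts_dir) if sub in c.lower()]
def pvIdxList (sub : String) (parts_dir : List String) : List Int :=
  ((PySem.List.enumerate parts_dir 0).filter
      (fun p => PySem.Str.isIn sub (PySem.Str.lower p.2))).map (·.1)

def detect_category_from_parts (parts_dir : List String) : Option String :=
  let idx_sporty := pvIdxList "sporty" parts_dir
  let idx_profesi := pvIdxList "profesi" parts_dir
  let last_sporty := idx_sporty.getLast?     -- idx_sporty[-1] if idx_sporty else None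
  let last_profesi := idx_profesi.getLast?
  match last_sporty, last_profesi with
  | some s, some p => some (if s > p then "sporty" else "profesi")
  | some _, none   => some "sporty"
  | none,   some _ => some "profesi"
  | none,   none   => none

-- ===== PORT B =====
-- the body of 'for c in reversed(parts_dir): …' from Source B
def pvRevScan : List String → Option String
  | [] => none
  | c :: rest =>
    let cl := PySem.Str.lower c
    let has_s := PySem.Str.isIn "sporty" cl
    let has_p := PySem.Str.isIn "profesi" cl
    if has_s && has_p then some "profesi"
    else if has_s then some "sporty"
    else if has_p then some "profesi"
    else pvRevScan rest

def detect_category_from_parts_alt (parts_dir : List String) : Option String :=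
  pvRevScan parts_dir.reverse

-- ===== PRECONDITION & SPEC =====
def Spec_detect_category_from_parts (parts_dir : List String) (out : Option String) : Prop := out = detect_category_from_parts_alt parts_dir
instance (parts_dir : List String) (out : Option String) : Decidable (Spec_detect_category_from_parts parts_dir out) := by unfold Spec_detect_category_from_parts; infer_instance

-- ===== CLAIM (what is proved, stated in full; the proofs are below) =====
def Claim_equal_detect_category_from_parts : Prop := ∀ (parts_dir : List String), Dom_detect_category_from_parts parts_dir → Spec_detect_category_from_parts parts_dir (detect_category_from_parts parts_dir)

-- ===== LEMMAS AND PROOFS =====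

theorem pvIdxList_append (sub : String) (l : List String) (c : String) :
    pvIdxList sub (l ++ [c]) =
      pvIdxList sub l ++
        (if PySem.Str.isIn sub (PySem.Str.lower c) then [(l.length : Int)] else []) := by
  by_cases h : PySem.Str.isIn sub (PySem.Str.lower c) = true <;>
    simp_all [pvIdxList, PySem.List.enumerate_append, PySem.List.enumerate_cons,
      List.filter_append]

theorem pvIdxList_lt {sub : String} {l : List String} {x : Int}
    (hx : x ∈ pvIdxList sub l) : x < (l.length : Int) := by
  simp only [pvIdxList, List.mem_map, List.mem_filter] at hx
  obtain ⟨p, ⟨hp, _⟩, rfl⟩ := hx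
  rw [PySem.List.mem_enumerate_iff] at hp
  obtain ⟨k, hk, rfl⟩ := hp
  simp
  omega

theorem pvA_eq_revScan (l : List String) :
    detect_category_from_parts l = pvRevScan l.reverse := by
  induction l using List.reverseRecOn with
  | nil => rfl
  | append_singleton l c ih =>
    rw [List.reverse_append, List.reverse_singleton, List.singleton_append]
    show _ = pvRevScan (c :: l.reverse)
    rw [pvRevScan]
    simp only [detect_category_from_parts,
      pvIdxList_append "sporty" l c, pvIdxList_append "profesi" l c]
    by_cases h1 : PySem.Str.isIn "sporty" (PySem.Str.lower c) = true <;>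
      by_cases h2 : PySem.Str.isIn "profesi" (PySem.Str.lower c) = true
    · -- both substrings present: equal last indices, tie goes to 'profesi'
      simp_all
    · -- only sporty: its last index (l.length) beats any profesi index from l
      rcases hP : (pvIdxList "profesi" l).getLast? with _ | p
      · simp_all
      · have hlt : p < (l.length : Int) := pvIdxList_lt (List.mem_of_getLast? hP)
        simp_all
    · -- only profesi: symmetric
      rcases hS : (pvIdxList "sporty" l).getLast? with _ | s
      · simp_all
      · have hlt : s < (l.length : Int) := pvIdxList_lt (List.mem_of_getLast? hS)
        have hnlt : ¬ ((l.length : Int) < s) := by omega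
        simp_all
    · -- neither: fall through to the induction hypothesis
      simp_all [detect_category_from_parts]

-- ===== VERDICT (by name: the statement is the Claim_ definition above) =====
theorem detect_category_from_parts_spec : Claim_equal_detect_category_from_parts := by
  intro parts_dir _
  unfold Spec_detect_category_from_parts detect_category_from_parts_alt
  exact pvA_eq_revScan parts_dir
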